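-- pv_equiv track=rewrite | github.com/datawhalechina/huawei-od-python | codes/questions200/240_Express-delivery-allocation-problem.py | solution
-- ===== SOURCE A (Python) =====
-- from typing import List, Dict, Set, Tuple
-- from collections import defaultdict
--
-- def solution(want: List[List[str]], cant: List[List[str]]) -> str:
--     # 初始化包裹道路信息的 字典 和 无法通行的道路字典
--     want_map: Dict[str, Set[str]] = defaultdict(set)
--     cant_map: Dict[str, Set[str]] = defaultdict(set)
--
--     # 将 want 中 包裹道路信息，按照 [key = package] = "起点-终点"的格式记录在want_map字典里
--     for arr in want:
--         pkg, path1, path2 = arr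
--         path = path1 + "-" + path2
--         want_map[path].add(pkg)
--
--     # 将 cant 中 不可通行信息，按照 [key = "起点-终点"] = 包裹1，包裹2，... 的格式记录在cant_map字典里
--     for arr in cant:
--         path1, path2, *pkgs = arr
--         path = path1 + "-" + path2
--         cant_map[path].update(pkgs)
--
--     res: List[str] = []
--     for path, want_pkg in want_map.items():
--         # 遍历包裹道路信息，在不可通行信息中找 key = 道路
--         cant_pkg = cant_map.get(path)
--
--         if cant_pkg is None:
--             continue
--
--         # 如果不可通行信息中有对应的包裹，则该包裹不可送达，需记录在结果中
--         for pkg in want_pkg: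
--             if pkg in cant_pkg:
--                 res.append(pkg)
--
--     if not res:
--         return "none"
--
--     # 按照包裹序列进行排序
--     res.sort(key=lambda s: int(s[7:]))
--
--     return " ".join(res)
-- ===== SOURCE B (Python) =====
-- from typing import List
--
--
-- def solution(want: List[List[str]], cant: List[List[str]]) -> str:
--     # No dictionaries or sets at all: for each want row, look back at earlier rows
--     # to skip duplicate (road, package) requests, and scan cant directly to see
--     # whether this package is blocked on this road.
--     res: List[str] = []
--     for i, (pkg, p1, p2) in enumerate(want):
--         path = p1 + "-" + p2
--         if any(w[1] + "-" + w[2] == path and w[0] == pkg for w in want[:i]):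
--             continue
--         if any(c[0] + "-" + c[1] == path and pkg in c[2:] for c in cant):
--             res.append(pkg)
--
--     if not res:
--         return "none"
--
--     res.sort(key=lambda s: int(s[7:]))
--
--     return " ".join(res)
-- ===== Notes on version B (the rewrite author's own statement) =====
-- stated objective: alternative
-- what changed: A builds two road-keyed hash maps of sets and intersects them per road; B uses no dict/set at all: one indexed pass over want that deduplicates by looking back at want[:i] and decides blockage by scanning cant directly, trading hash indexes for nested scans.
import Mathlib
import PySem

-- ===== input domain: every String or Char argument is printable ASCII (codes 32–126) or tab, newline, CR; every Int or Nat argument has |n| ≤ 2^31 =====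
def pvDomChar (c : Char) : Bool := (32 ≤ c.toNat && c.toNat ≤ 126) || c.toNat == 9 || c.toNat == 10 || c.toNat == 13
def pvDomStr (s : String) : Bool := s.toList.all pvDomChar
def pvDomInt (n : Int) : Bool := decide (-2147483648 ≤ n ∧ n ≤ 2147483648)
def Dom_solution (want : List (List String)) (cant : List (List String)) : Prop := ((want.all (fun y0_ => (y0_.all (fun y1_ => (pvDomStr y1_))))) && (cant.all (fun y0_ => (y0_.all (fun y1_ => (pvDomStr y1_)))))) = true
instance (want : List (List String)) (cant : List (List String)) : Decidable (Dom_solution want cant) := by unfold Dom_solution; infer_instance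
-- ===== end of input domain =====

-- B drops A's two road-keyed hash maps entirely: one indexed pass over `want` that
-- deduplicates by looking back at want[:i] and decides blockage by scanning `cant`
-- directly (objective: alternative — nested scans instead of hash indexes).

-- ===== PORT A =====
-- A's sort key: total form of Python's `int(s[7:])`; Pre_solution guarantees the parse
-- succeeds (returns `some`) for every element that is actually sorted
def pvKey (s : String) : Int :=
  (PySem.Int.ofStr? (PySem.Str.slice s (some 7) none)).getD 0

-- (A's `for pkg in want_pkg` iterates a Python set, whose hash order is not modelled; the
-- port iterates in insertion order — under Pre_solution the final sorted output is the same.)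
def solution (want : List (List String)) (cant : List (List String)) : String :=
  let want_map : PySem.Dict String (PySem.Set String) :=
    want.foldl (fun d arr =>
      match arr with
      | [pkg, path1, path2] =>
          d.modify (path1 ++ "-" ++ path2) PySem.Set.empty (fun s => PySem.Set.add s pkg)
      | _ => d) PySem.Dict.empty
  let cant_map : PySem.Dict String (PySem.Set String) :=
    cant.foldl (fun d arr =>
      d.modify (arr.getD 0 "" ++ "-" ++ arr.getD 1 "") PySem.Set.empty
        (fun s => PySem.Set.update s (arr.drop 2))) PySem.Dict.empty
  let res : List String :=
    want_map.items.foldl (fun res pr =>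
      match cant_map.get? pr.1 with
      | none => res
      | some cant_pkg =>
          pr.2.foldl (fun res pkg =>
            if PySem.Set.contains cant_pkg pkg then res ++ [pkg] else res) res) []
  if res = [] then "none"
  else PySem.Str.join " " (PySem.List.sorted res pvKey)

-- ===== PORT B =====
-- B's sort key, the same total form of Python's `int(s[7:])`
def pvKeyAlt (s : String) : Int :=
  (PySem.Int.ofStr? (PySem.Str.slice s (some 7) none)).getD 0

def solution_alt (want : List (List String)) (cant : List (List String)) : String :=
  let res : List String :=
    (PySem.List.enumerate want 0).foldl (fun res p =>
      -- `for i, (pkg, p1, p2) in enumerate(want)`: the length guard only makes the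
      -- unpack total (Pre_solution excludes rows of any other arity, where Python raises)
      if p.2.length = 3 then
        if (PySem.List.slice want none (some p.1)).any
            (fun w => (w.getD 1 "" ++ "-" ++ w.getD 2 "" ==
                        p.2.getD 1 "" ++ "-" ++ p.2.getD 2 "") &&
                      (w.getD 0 "" == p.2.getD 0 "")) then res
        else if cant.any (fun c =>
              ((c.getD 0 "" ++ "-" ++ c.getD 1 "") ==
                (p.2.getD 1 "" ++ "-" ++ p.2.getD 2 "")) &&
              (c.drop 2).contains (p.2.getD 0 "")) then res ++ [p.2.getD 0 ""]
        else res
      else res) []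
  if res = [] then "none"
  else PySem.Str.join " " (PySem.List.sorted res pvKeyAlt)

-- ===== PRECONDITION & SPEC =====
-- `pvBlockedB cant path pkg` = some cant row names road `path` and blocks package `pkg`
def pvBlockedB (cant : List (List String)) (path pkg : String) : Bool :=
  cant.any (fun c =>
    ((c.getD 0 "" ++ "-" ++ c.getD 1 "") == path) && (c.drop 2).contains pkg)

def pvKey? (s : String) : Option Int :=
  PySem.Int.ofStr? (PySem.Str.slice s (some 7) none)

-- Pre_ excludes (a) rows of the wrong arity, on which A's tuple unpacking raises ValueError,
-- (b) inputs where some blocked package name has no int literal after position 7, so A's sort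
-- key `int(s[7:])` raises ValueError, and (c) inputs where two distinct blocked package names
-- share the same numeric sort key, where A's output order depends on Python's hash-based
-- set/dict iteration order (an unspecified tie).
def Pre_solution (want : List (List String)) (cant : List (List String)) : Prop :=
  (∀ row ∈ want, row.length = 3) ∧
  (∀ row ∈ cant, 2 ≤ row.length) ∧
  (∀ row ∈ want,
    pvBlockedB cant (row.getD 1 "" ++ "-" ++ row.getD 2 "") (row.getD 0 "") = true →
    (pvKey? (row.getD 0 "")).isSome = true) ∧
  (∀ r1 ∈ want, ∀ r2 ∈ want,
    pvBlockedB cant (r1.getD 1 "" ++ "-" ++ r1.getD 2 "") (r1.getD 0 "") = true →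
    pvBlockedB cant (r2.getD 1 "" ++ "-" ++ r2.getD 2 "") (r2.getD 0 "") = true →
    pvKey? (r1.getD 0 "") = pvKey? (r2.getD 0 "") → r1.getD 0 "" = r2.getD 0 "")

instance (want : List (List String)) (cant : List (List String)) :
    Decidable (Pre_solution want cant) := by unfold Pre_solution; infer_instance

def pvWitness_solution : List (List String) × List (List String) :=
  ([["package1", "a", "b"]], [["a", "b", "package1"]])

def Spec_solution (want : List (List String)) (cant : List (List String)) (out : String) : Prop :=
  out = solution_alt want cant
instance (want : List (List String)) (cant : List (List String)) (out : String) :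
    Decidable (Spec_solution want cant out) := by unfold Spec_solution; infer_instance

-- ===== CLAIM (what is proved, stated in full; the proofs are below) =====
def Claim_equal_solution : Prop := ∀ (want : List (List String)) (cant : List (List String)), Dom_solution want cant → Pre_solution want cant → Spec_solution want cant (solution want cant)

-- ===== LEMMAS AND PROOFS =====


-- getD through the want_map building fold
theorem pv_getD_wmfold (l : List (String × String))
    (d : PySem.Dict String (PySem.Set String)) (c : String) :
    (l.foldl (fun d pr => d.modify pr.1 PySem.Set.empty (fun s => PySem.Set.add s pr.2)) d).getD
        c PySem.Set.empty
    = PySem.Set.update (d.getD c PySem.Set.empty)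
        ((l.filter (fun pr => pr.1 == c)).map Prod.snd) := by
  induction l generalizing d with
  | nil => simp [PySem.Set.update]
  | cons pr t ih =>
      simp only [List.foldl_cons, ih, PySem.Dict.getD_modify, List.filter_cons]
      by_cases h : pr.1 = c
      · simp [h, PySem.Set.update]
      · simp [h, Ne.symm h, beq_iff_eq]

-- getD through the cant_map building fold
theorem pv_getD_cmfold (l : List (List String))
    (d : PySem.Dict String (PySem.Set String)) (c : String) :
    (l.foldl (fun d arr => d.modify (arr.getD 0 "" ++ "-" ++ arr.getD 1 "") PySem.Set.empty
        (fun s => PySem.Set.update s (arr.drop 2))) d).getD c PySem.Set.empty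
    = PySem.Set.update (d.getD c PySem.Set.empty)
        ((l.filter (fun arr => (arr.getD 0 "" ++ "-" ++ arr.getD 1 "") == c)).flatMap
          (fun arr => arr.drop 2)) := by
  induction l generalizing d with
  | nil => simp [PySem.Set.update]
  | cons arr t ih =>
      simp only [List.foldl_cons, ih, PySem.Dict.getD_modify, List.filter_cons]
      by_cases h : (arr.getD 0 "" ++ "-" ++ arr.getD 1 "") = c
      · rw [h]
        simp [PySem.Set.update, List.foldl_append]
      · rw [if_neg (fun hc => h hc.symm), if_neg (by simpa using h)]

-- membership in a Set.update from empty
theorem pv_mem_update_empty {α : Type} [BEq α] [LawfulBEq α] (l : List α) (x : α) :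
    x ∈ PySem.Set.update PySem.Set.empty l ↔ x ∈ l := by
  have : PySem.Set.update PySem.Set.empty l = PySem.Set.ofList l := rfl
  rw [this, PySem.Set.mem_ofList]


def pvPairs (want : List (List String)) : List (String × String) :=
  want.filterMap (fun row =>
    match row with
    | [pkg, p1, p2] => some (p1 ++ "-" ++ p2, pkg)
    | _ => none)

theorem pv_pairs_fold {β : Type} (f : β → String × String → β)
    (want : List (List String)) (init : β) :
    want.foldl (fun b row =>
      match row with
      | [pkg, p1, p2] => f b (p1 ++ "-" ++ p2, pkg)
      | _ => b) init
    = (pvPairs want).foldl f init := by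
  induction want generalizing init with
  | nil => rfl
  | cons row t ih =>
      rcases row with _ | ⟨p, _ | ⟨a, _ | ⟨b, _ | u⟩⟩⟩ <;>
        simp only [pvPairs, List.filterMap_cons, List.foldl_cons] <;> exact ih _

def pvWm (want : List (List String)) : PySem.Dict String (PySem.Set String) :=
  (pvPairs want).foldl
    (fun d pr => d.modify pr.1 PySem.Set.empty (fun s => PySem.Set.add s pr.2))
    PySem.Dict.empty

theorem pv_wm_eq (want : List (List String)) :
    want.foldl (fun d arr =>
      match arr with
      | [pkg, path1, path2] =>
          d.modify (path1 ++ "-" ++ path2) PySem.Set.empty (fun s => PySem.Set.add s pkg)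
      | _ => d) PySem.Dict.empty = pvWm want :=
  pv_pairs_fold
    (fun d pr => d.modify pr.1 PySem.Set.empty (fun s => PySem.Set.add s pr.2))
    want PySem.Dict.empty

theorem pv_getD_wm (want : List (List String)) (p : String) :
    (pvWm want).getD p PySem.Set.empty
    = PySem.Set.ofList (((pvPairs want).filter (fun pr => pr.1 == p)).map Prod.snd) := by
  rw [pvWm, pv_getD_wmfold, PySem.Dict.getD_empty]
  rfl

theorem pv_keys_wm (want : List (List String)) :
    (pvWm want).keys = PySem.Set.ofList ((pvPairs want).map Prod.fst) := by
  rw [pvWm]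
  show ((pvPairs want).foldl (fun d pr =>
    d.modify (Prod.fst pr) PySem.Set.empty (fun s => PySem.Set.add s pr.2))
    PySem.Dict.empty).keys = _
  rw [PySem.Dict.keys_foldl_modify_key (pvPairs want) Prod.fst PySem.Set.empty
    (fun _ pr => fun s => PySem.Set.add s pr.2) PySem.Dict.empty]
  rfl

theorem pv_nodup_keys_wm (want : List (List String)) : (pvWm want).keys.Nodup := by
  rw [pv_keys_wm]; exact PySem.Set.nodup_ofList _

-- every pair comes from a well-formed want row
theorem pv_mem_pairs (want : List (List String)) (pr : String × String)
    (h : pr ∈ pvPairs want) :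
    ∃ row ∈ want, row.getD 0 "" = pr.2 ∧ row.getD 1 "" ++ "-" ++ row.getD 2 "" = pr.1 := by
  rw [pvPairs, List.mem_filterMap] at h
  obtain ⟨row, hrow, hmatch⟩ := h
  rcases row with _ | ⟨p, _ | ⟨a, _ | ⟨b, _ | u⟩⟩⟩
  · simp at hmatch
  · simp at hmatch
  · simp at hmatch
  · simp only [Option.some.injEq] at hmatch
    subst hmatch
    exact ⟨[p, a, b], hrow, by simp, by simp⟩
  · simp at hmatch


-- B's row → (road, package) pair
def pvPairOf (r : List String) : String × String :=
  (r.getD 1 "" ++ "-" ++ r.getD 2 "", r.getD 0 "")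

theorem pv_pairs_of_h3 (want : List (List String)) (h3 : ∀ row ∈ want, row.length = 3) :
    want.map pvPairOf = pvPairs want := by
  induction want with
  | nil => rfl
  | cons row t ih =>
      obtain ⟨a, b, c, rfl⟩ := List.length_eq_three.mp (h3 row (by simp))
      simp only [List.map_cons, pvPairs, List.filterMap_cons]
      rw [← pvPairs, ih (fun r hr => h3 r (by simp [hr]))]
      rfl

-- duplicate look-back test = membership of the pair among the earlier pairs
theorem pv_any_pair (l : List (List String)) (path pkg : String) :
    l.any (fun w => (w.getD 1 "" ++ "-" ++ w.getD 2 "" == path) && (w.getD 0 "" == pkg))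
    = (l.map pvPairOf).contains (path, pkg) := by
  rw [Bool.eq_iff_iff, List.any_eq_true, List.contains_iff_mem]
  simp only [List.mem_map, Bool.and_eq_true, beq_iff_eq, pvPairOf, Prod.mk.injEq]

-- first occurrences: keep a pair iff it does not occur among the first n pairs of P
def pvFirsts (P : List (String × String)) : Nat → List (String × String) → List (String × String)
  | _, [] => []
  | n, pr :: t =>
      if (P.take n).contains pr then pvFirsts P (n + 1) t
      else pr :: pvFirsts P (n + 1) t

def pvNew (seen : PySem.Set (String × String)) :
    List (String × String) → List (String × String)
  | [] => []
  | pr :: t =>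
      if PySem.Set.contains seen pr then pvNew seen t
      else pr :: pvNew (PySem.Set.add seen pr) t

theorem pv_update_eq_append_pvNew (l : List (String × String))
    (seen : PySem.Set (String × String)) :
    PySem.Set.update seen l = seen ++ pvNew seen l := by
  induction l generalizing seen with
  | nil => simp [PySem.Set.update, pvNew]
  | cons pr t ih =>
      have hstep : PySem.Set.update seen (pr :: t) = PySem.Set.update (PySem.Set.add seen pr) t := rfl
      rw [hstep]
      by_cases h : PySem.Set.contains seen pr
      · have hm : pr ∈ seen := (PySem.Set.contains_iff seen pr).mp h
        have hadd : PySem.Set.add seen pr = seen := by simp [PySem.Set.add, h, hm]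
        simp [pvNew, hm, hadd, ih]
      · have hm : pr ∉ seen := fun hx => h ((PySem.Set.contains_iff seen pr).mpr hx)
        have hadd : PySem.Set.add seen pr = seen ++ [pr] := by
          simp [PySem.Set.add, h, hm]
        simp [pvNew, hm, ih, hadd]

theorem pv_pvNew_empty (l : List (String × String)) :
    pvNew PySem.Set.empty l = PySem.Set.ofList l := by
  have h := pv_update_eq_append_pvNew l PySem.Set.empty
  have h2 : PySem.Set.update PySem.Set.empty l = PySem.Set.ofList l := rfl
  rw [h2] at h
  simpa [PySem.Set.empty] using h.symm

-- pvFirsts agrees with pvNew when `seen` holds exactly the first n pairs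
theorem pv_firsts_eq_new (P : List (String × String)) (t : List (String × String)) :
    ∀ (n : Nat) (seen : PySem.Set (String × String)), P.drop n = t →
    (∀ pr, pr ∈ seen ↔ pr ∈ P.take n) → pvFirsts P n t = pvNew seen t := by
  induction t with
  | nil => intro n seen _ _; rfl
  | cons pr t ih =>
      intro n seen hdrop hseen
      have hPn : P[n]? = some pr := by
        have h0 : (P.drop n)[0]? = some pr := by rw [hdrop]; rfl
        rw [List.getElem?_drop] at h0
        simpa using h0
      have htake : P.take (n + 1) = P.take n ++ [pr] := by
        rw [List.take_succ, hPn]; rfl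
      have hdrop' : P.drop (n + 1) = t := by
        have := congrArg (List.drop 1) hdrop
        simpa [List.drop_drop, Nat.add_comm] using this
      have hc : PySem.Set.contains seen pr = (P.take n).contains pr := by
        rw [Bool.eq_iff_iff, PySem.Set.contains_iff, hseen, List.contains_iff_mem]
      by_cases h : (P.take n).contains pr = true
      · have hmem : pr ∈ P.take n := List.contains_iff_mem.mp h
        simp only [pvFirsts, pvNew, h, hc, if_pos]
        refine ih (n + 1) seen hdrop' ?_
        intro x
        rw [hseen, htake]
        simp only [List.mem_append, List.mem_singleton]
        constructor
        · exact Or.inl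
        · rintro (hx | rfl)
          · exact hx
          · exact hmem
      · simp only [pvFirsts, pvNew, h, hc, Bool.false_eq_true, if_neg, if_false]
        congr 1
        refine ih (n + 1) (PySem.Set.add seen pr) hdrop' ?_
        intro x
        rw [PySem.Set.mem_add, hseen, htake]
        simp [or_comm]

theorem pv_firsts_all (P : List (String × String)) :
    pvFirsts P 0 P = PySem.Set.ofList P := by
  rw [pv_firsts_eq_new P P 0 PySem.Set.empty (by simp) (by intro pr; simp [PySem.Set.empty]),
    pv_pvNew_empty]

-- B's main loop, characterised: it collects the packages of the first-occurrence
-- blocked pairs, in want order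
theorem pv_b_main (want cant : List (List String)) (h3 : ∀ row ∈ want, row.length = 3)
    (xs : List (List String)) :
    ∀ (n : Nat) (res : List String), want.drop n = xs →
    (PySem.List.enumerate xs ((n : Nat) : Int)).foldl (fun res p =>
      if p.2.length = 3 then
        if (PySem.List.slice want none (some p.1)).any
            (fun w => (w.getD 1 "" ++ "-" ++ w.getD 2 "" ==
                        p.2.getD 1 "" ++ "-" ++ p.2.getD 2 "") &&
                      (w.getD 0 "" == p.2.getD 0 "")) then res
        else if cant.any (fun c =>
              ((c.getD 0 "" ++ "-" ++ c.getD 1 "") ==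
                (p.2.getD 1 "" ++ "-" ++ p.2.getD 2 "")) &&
              (c.drop 2).contains (p.2.getD 0 "")) then res ++ [p.2.getD 0 ""]
        else res
      else res) res
    = res ++ ((pvFirsts (want.map pvPairOf) n (xs.map pvPairOf)).filter
        (fun pr => pvBlockedB cant pr.1 pr.2)).map Prod.snd := by
  induction xs with
  | nil => intro n res _; simp [PySem.List.enumerate, pvFirsts]
  | cons row t ih =>
      intro n res hdrop
      have hrow : row ∈ want := List.drop_subset n want (by rw [hdrop]; simp)
      have hdrop' : want.drop (n + 1) = t := by
        have := congrArg (List.drop 1) hdrop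
        simpa [List.drop_drop, Nat.add_comm] using this
      have hcast : ((n : Nat) : Int) + 1 = (((n + 1 : Nat)) : Int) := by push_cast; ring
      simp only [List.map_cons, PySem.List.enumerate_cons, List.foldl_cons, h3 row hrow,
        if_pos, PySem.List.slice_to_natCast, hcast]
      rw [pv_any_pair, List.map_take]
      have hbl : cant.any (fun c =>
            ((c.getD 0 "" ++ "-" ++ c.getD 1 "") ==
              (row.getD 1 "" ++ "-" ++ row.getD 2 "")) &&
            (c.drop 2).contains (row.getD 0 ""))
          = pvBlockedB cant (pvPairOf row).1 (pvPairOf row).2 := rfl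
      simp only [pvFirsts]
      by_cases hdup : ((want.map pvPairOf).take n).contains
          (row.getD 1 "" ++ "-" ++ row.getD 2 "", row.getD 0 "") = true
      · have hdup' : ((want.map pvPairOf).take n).contains (pvPairOf row) = true := hdup
        simp only [hdup, if_pos, hdup', ih (n + 1) res hdrop']
      · have hdup' : ¬ (((want.map pvPairOf).take n).contains (pvPairOf row) = true) := hdup
        simp only [hdup, Bool.false_eq_true, if_neg, if_false, hdup', hbl]
        by_cases hb : pvBlockedB cant (pvPairOf row).1 (pvPairOf row).2 = true
        · simp only [hb, if_pos, ih (n + 1) (res ++ [row.getD 0 ""]) hdrop',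
            List.filter_cons, List.map_cons]
          simp [pvPairOf]
        · simp only [hb, Bool.false_eq_true, if_false,
            ih (n + 1) res hdrop', List.filter_cons]


def pvRoad (arr : List String) : String := arr.getD 0 "" ++ "-" ++ arr.getD 1 ""

def pvCm (cant : List (List String)) : PySem.Dict String (PySem.Set String) :=
  cant.foldl (fun d arr =>
    d.modify (arr.getD 0 "" ++ "-" ++ arr.getD 1 "") PySem.Set.empty
      (fun s => PySem.Set.update s (arr.drop 2))) PySem.Dict.empty

theorem pv_mem_cm (cant : List (List String)) (p x : String) :
    x ∈ (pvCm cant).getD p PySem.Set.empty ↔ pvBlockedB cant p x = true := by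
  rw [pvCm, pv_getD_cmfold, PySem.Dict.getD_empty, pv_mem_update_empty]
  simp only [pvBlockedB, List.mem_flatMap, List.mem_filter, List.any_eq_true,
    Bool.and_eq_true, beq_iff_eq, List.contains_iff_mem]
  tauto

theorem pv_keys_cm (cant : List (List String)) :
    (pvCm cant).keys = PySem.Set.ofList (cant.map pvRoad) := by
  rw [pvCm]
  show (cant.foldl (fun d arr =>
    d.modify (pvRoad arr) PySem.Set.empty (fun s => PySem.Set.update s (arr.drop 2)))
    PySem.Dict.empty).keys = _
  rw [PySem.Dict.keys_foldl_modify_key cant pvRoad PySem.Set.empty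
    (fun _ arr => fun s => PySem.Set.update s (arr.drop 2)) PySem.Dict.empty]
  rfl

theorem pv_not_blocked_of_not_key (cant : List (List String)) (p x : String)
    (h : p ∉ (pvCm cant).keys) : pvBlockedB cant p x = false := by
  rw [pv_keys_cm] at h
  simp only [PySem.Set.mem_ofList, List.mem_map] at h
  push Not at h
  simp only [pvBlockedB, List.any_eq_false]
  intro c hc
  simp [pvRoad] at h
  simp [h c hc]


-- two sorted-by-key lists that are permutations, with a key injective on their
-- members, are equal
theorem pv_eq_of_perm_sorted (l1 l2 : List String) (hp : l1.Perm l2)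
    (h1 : l1.Pairwise (fun a b => pvKey a ≤ pvKey b))
    (h2 : l2.Pairwise (fun a b => pvKey a ≤ pvKey b))
    (hinj : ∀ a ∈ l1, ∀ b ∈ l1, pvKey a = pvKey b → a = b) : l1 = l2 := by
  induction l1 generalizing l2 with
  | nil => exact (hp.nil_eq).symm ▸ rfl
  | cons a t1 ih =>
      cases l2 with
      | nil => exact absurd hp.symm (by simp)
      | cons b t2 =>
          have hab : a = b := by
            by_contra hne
            have hbmem : b ∈ t1 := by
              have : b ∈ a :: t1 := hp.symm.mem_iff.mp (by simp)
              rcases List.mem_cons.mp this with h | h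
              · exact absurd h.symm hne
              · exact h
            have hamem : a ∈ t2 := by
              have : a ∈ b :: t2 := hp.mem_iff.mp (by simp)
              rcases List.mem_cons.mp this with h | h
              · exact absurd h hne
              · exact h
            have hk1 : pvKey a ≤ pvKey b := (List.pairwise_cons.mp h1).1 b hbmem
            have hk2 : pvKey b ≤ pvKey a := (List.pairwise_cons.mp h2).1 a hamem
            exact hne (hinj a (by simp) b (by simp [hbmem]) (le_antisymm hk1 hk2))
          subst hab
          have htp : t1.Perm t2 := hp.cons_inv
          have := ih t2 htp (List.pairwise_cons.mp h1).2 (List.pairwise_cons.mp h2).2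
            (fun x hx y hy hk => hinj x (by simp [hx]) y (by simp [hy]) hk)
          rw [this]

theorem pv_sorted_eq (xs ys : List String) (hp : xs.Perm ys)
    (hinj : ∀ a ∈ xs, ∀ b ∈ xs, pvKey a = pvKey b → a = b) :
    PySem.List.sorted xs pvKey = PySem.List.sorted ys pvKey := by
  refine pv_eq_of_perm_sorted _ _ ?_ (PySem.List.sorted_pairwise xs pvKey)
    (PySem.List.sorted_pairwise ys pvKey) ?_
  · exact ((PySem.List.sorted_perm xs pvKey false).trans hp).trans
      (PySem.List.sorted_perm ys pvKey false).symm
  · intro a ha b hb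
    rw [PySem.List.mem_sorted] at ha hb
    exact hinj a ha b hb


-- the deduped (road, pkg) pairs are a permutation of the road-grouped pairs
theorem pv_dd_perm_flat (P : List (String × String)) :
    (PySem.Set.ofList P).Perm
      ((PySem.Set.ofList (P.map Prod.fst)).flatMap (fun p =>
        (PySem.Set.ofList ((P.filter (fun pr => pr.1 == p)).map Prod.snd)).map
          (fun x => (p, x)))) := by
  have hmemS : ∀ p x, x ∈ PySem.Set.ofList ((P.filter (fun pr => pr.1 == p)).map Prod.snd)
      ↔ (p, x) ∈ P := by
    intro p x
    rw [PySem.Set.mem_ofList]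
    simp only [List.mem_map, List.mem_filter, beq_iff_eq]
    constructor
    · rintro ⟨pr, ⟨hm, rfl⟩, rfl⟩
      simpa using hm
    · intro h
      exact ⟨(p, x), ⟨h, rfl⟩, rfl⟩
  refine (List.perm_ext_iff_of_nodup (PySem.Set.nodup_ofList P) ?_).mpr ?_
  · rw [List.flatMap_def, List.nodup_flatten]
    constructor
    · intro l hl
      simp only [List.mem_map] at hl
      obtain ⟨p, hp, rfl⟩ := hl
      exact (PySem.Set.nodup_ofList _).map (fun x y h => by simpa using h)
    · refine List.Pairwise.map _ ?_ (PySem.Set.nodup_ofList (P.map Prod.fst))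
      intro p q hpq
      intro z hz hz'
      simp only [List.mem_map] at hz hz'
      obtain ⟨x, _, rfl⟩ := hz
      obtain ⟨y, _, h⟩ := hz'
      exact hpq (by simpa using congrArg Prod.fst h.symm)
  · intro pr
    rw [PySem.Set.mem_ofList, List.mem_flatMap]
    constructor
    · intro h
      refine ⟨pr.1, ?_, ?_⟩
      · rw [PySem.Set.mem_ofList]
        exact List.mem_map_of_mem h
      · simp only [List.mem_map]
        exact ⟨pr.2, (hmemS pr.1 pr.2).mpr h, rfl⟩
    · rintro ⟨p, _, hmem⟩
      simp only [List.mem_map] at hmem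
      obtain ⟨x, hx, rfl⟩ := hmem
      exact (hmemS p x).mp hx

-- push a filter-and-project through the grouped pairs
theorem pv_flat_proj (K : List String) (S : String → List String)
    (q : String × String → Bool) :
    ((K.flatMap (fun p => (S p).map (fun x => (p, x)))).filter q).map Prod.snd
    = K.flatMap (fun p => (S p).filter (fun x => q (p, x))) := by
  rw [List.filter_flatMap, List.map_flatMap]
  refine List.flatMap_congr ?_
  intro p _
  rw [List.filter_map, List.map_map]
  simp [Function.comp_def]

-- membership in the grouped per-road set
theorem pv_mem_filter_snd (P : List (String × String)) (p x : String) :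
    x ∈ PySem.Set.ofList ((P.filter (fun pr => pr.1 == p)).map Prod.snd) ↔ (p, x) ∈ P := by
  rw [PySem.Set.mem_ofList]
  simp only [List.mem_map, List.mem_filter, beq_iff_eq]
  constructor
  · rintro ⟨pr, ⟨hm, rfl⟩, rfl⟩
    simpa using hm
  · intro h
    exact ⟨(p, x), ⟨h, rfl⟩, rfl⟩

-- A's collection loop over want_map.items, characterised
theorem pv_resA (want cant : List (List String)) :
    (pvWm want).items.foldl (fun res pr =>
      match (pvCm cant).get? pr.1 with
      | none => res
      | some cant_pkg =>
          pr.2.foldl (fun res pkg =>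
            if PySem.Set.contains cant_pkg pkg then res ++ [pkg] else res) res) []
    = (pvWm want).keys.flatMap (fun p =>
        ((pvWm want).getD p PySem.Set.empty).filter (fun x => pvBlockedB cant p x)) := by
  rw [PySem.List.foldl_congr_mem _ _
    (fun res pr => res ++ (match (pvCm cant).get? pr.1 with
      | none => []
      | some cant_pkg => pr.2.filter (fun pkg => PySem.Set.contains cant_pkg pkg))) _
    (by
      intro acc pr _
      cases h : (pvCm cant).get? pr.1 with
      | none => simp [h]
      | some cs => simp only [h]; exact PySem.List.foldl_append_if_eq_filter _ _ _)]
  rw [PySem.List.foldl_append_eq_flatMap, List.nil_append]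
  rw [PySem.Dict.items_eq_map_keys (pvWm want) (pv_nodup_keys_wm want) PySem.Set.empty]
  rw [List.flatMap_map]
  refine List.flatMap_congr ?_
  intro p _
  cases hq : (pvCm cant).get? p with
  | none =>
      have hk : p ∉ (pvCm cant).keys := (PySem.Dict.get?_eq_none_iff_not_mem_keys _ _).mp hq
      rw [eq_comm, List.filter_eq_nil_iff]
      intro x _
      simp [pv_not_blocked_of_not_key cant p x hk]
  | some cs =>
      refine List.filter_congr ?_
      intro x _
      rw [Bool.eq_iff_iff, PySem.Set.contains_iff]
      have h2 := pv_mem_cm cant p x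
      rw [PySem.Dict.getD_of_get?_eq_some _ _ hq] at h2
      exact h2

-- A's result, characterised
theorem pv_A_char (want cant : List (List String)) :
    solution want cant =
      (let res := (pvWm want).keys.flatMap (fun p =>
        ((pvWm want).getD p PySem.Set.empty).filter (fun x => pvBlockedB cant p x));
       if res = [] then "none" else PySem.Str.join " " (PySem.List.sorted res pvKey)) := by
  simp only [solution]
  rw [pv_wm_eq]
  rw [show (cant.foldl (fun d arr =>
      d.modify (arr.getD 0 "" ++ "-" ++ arr.getD 1 "") PySem.Set.empty
        (fun s => PySem.Set.update s (arr.drop 2))) PySem.Dict.empty) = pvCm cant from rfl]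
  rw [pv_resA]

-- B's result, characterised
theorem pv_B_char (want cant : List (List String)) (h3 : ∀ row ∈ want, row.length = 3) :
    solution_alt want cant =
      (let res := ((PySem.Set.ofList (pvPairs want)).filter
          (fun pr => pvBlockedB cant pr.1 pr.2)).map Prod.snd;
       if res = [] then "none" else PySem.Str.join " " (PySem.List.sorted res pvKey)) := by
  simp only [solution_alt]
  rw [show ((0 : Int)) = ((0 : Nat) : Int) from rfl]
  rw [pv_b_main want cant h3 want 0 [] (by simp), List.nil_append]
  rw [pv_firsts_all, pv_pairs_of_h3 want h3]
  rfl

-- every element of A's res is the first field of a blocked want row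
theorem pv_mem_LA (want cant : List (List String)) (a : String)
    (ha : a ∈ (pvWm want).keys.flatMap (fun p =>
      ((pvWm want).getD p PySem.Set.empty).filter (fun x => pvBlockedB cant p x))) :
    ∃ row ∈ want, row.getD 0 "" = a ∧
      pvBlockedB cant (row.getD 1 "" ++ "-" ++ row.getD 2 "") (row.getD 0 "") = true := by
  rw [List.mem_flatMap] at ha
  obtain ⟨p, _, hmem⟩ := ha
  rw [List.mem_filter] at hmem
  obtain ⟨hS, hbl⟩ := hmem
  rw [pv_getD_wm, pv_mem_filter_snd] at hS
  obtain ⟨row, hrow, h0, h12⟩ := pv_mem_pairs want (p, a) hS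
  exact ⟨row, hrow, h0, by rw [h0, h12]; exact hbl⟩

-- ===== VERDICT (by name: the statement is the Claim_ definition above) =====
theorem solution_spec : Claim_equal_solution := by
  intro want cant _ hpre
  obtain ⟨h3, h2c, hsome, hinj⟩ := hpre
  unfold Spec_solution
  rw [pv_A_char, pv_B_char want cant h3]
  have hperm :
      (((PySem.Set.ofList (pvPairs want)).filter
        (fun pr => pvBlockedB cant pr.1 pr.2)).map Prod.snd).Perm
      ((pvWm want).keys.flatMap (fun p =>
        ((pvWm want).getD p PySem.Set.empty).filter (fun x => pvBlockedB cant p x))) := by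
    have h1 := ((pv_dd_perm_flat (pvPairs want)).filter
      (fun pr => pvBlockedB cant pr.1 pr.2)).map Prod.snd
    rw [pv_flat_proj] at h1
    refine h1.trans ?_
    rw [← pv_keys_wm]
    refine List.Perm.of_eq (List.flatMap_congr ?_)
    intro p _
    rw [pv_getD_wm]
  have hinjA : ∀ a ∈ (pvWm want).keys.flatMap (fun p =>
        ((pvWm want).getD p PySem.Set.empty).filter (fun x => pvBlockedB cant p x)),
      ∀ b ∈ (pvWm want).keys.flatMap (fun p =>
        ((pvWm want).getD p PySem.Set.empty).filter (fun x => pvBlockedB cant p x)),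
      pvKey a = pvKey b → a = b := by
    intro a ha b hb hk
    obtain ⟨ra, hra, ha0, habl⟩ := pv_mem_LA want cant a ha
    obtain ⟨rb, hrb, hb0, hbbl⟩ := pv_mem_LA want cant b hb
    have hsa := hsome ra hra habl
    have hsb := hsome rb hrb hbbl
    obtain ⟨m, hm⟩ := Option.isSome_iff_exists.mp hsa
    obtain ⟨n, hn⟩ := Option.isSome_iff_exists.mp hsb
    have hkey : pvKey? (ra.getD 0 "") = pvKey? (rb.getD 0 "") := by
      have hma : pvKey (ra.getD 0 "") = m := by
        show (pvKey? (ra.getD 0 "")).getD 0 = m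
        rw [hm]; rfl
      have hnb : pvKey (rb.getD 0 "") = n := by
        show (pvKey? (rb.getD 0 "")).getD 0 = n
        rw [hn]; rfl
      rw [hm, hn]
      rw [ha0] at hma
      rw [hb0] at hnb
      rw [← hma, ← hnb, hk]
    have := hinj ra hra rb hrb habl hbbl hkey
    rw [← ha0, ← hb0, this]
  set LA := (pvWm want).keys.flatMap (fun p =>
    ((pvWm want).getD p PySem.Set.empty).filter (fun x => pvBlockedB cant p x)) with hLA
  set LB := ((PySem.Set.ofList (pvPairs want)).filter
    (fun pr => pvBlockedB cant pr.1 pr.2)).map Prod.snd with hLB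
  by_cases hA : LA = []
  · have hB : LB = [] := by
      have hl := hperm.length_eq
      rw [hA] at hl
      exact List.eq_nil_of_length_eq_zero (by simpa using hl)
    simp [hA, hB]
  · have hB : LB ≠ [] := by
      intro h
      apply hA
      have hl := hperm.length_eq
      rw [h] at hl
      exact List.eq_nil_of_length_eq_zero (by simpa using hl.symm)
    simp only [hA, hB, if_neg]
    rw [pv_sorted_eq LA LB hperm.symm hinjA]
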